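-- pv_equiv track=rewrite | github.com/johnnyw66/flowers | garden.py | updated_positions_greedy
-- ===== SOURCE A (Python) =====
-- import itertools
--
-- def distance(x1, x2, y1, y2):
--     return abs(x2 - x1) + abs(y2 - y1)
--
-- def is_valid_position(garden, row, col, flower_type, min_dist):
--     for r in range(len(garden)):
--         for c in range(len(garden[0])):
--             if garden[r][c] == flower_type:
--                 manhat_dist = distance(col, c, row, r)
--                 if manhat_dist < min_dist: # Distance Rule broken - not valid.
--                     return False
--     return True
--
-- def updated_positions_greedy(garden, flower_type, count, min_dist):
--     placed = 0
--     for row, col in itertools.product(range(len(garden)), range(len(garden[0]))):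
--         if garden[row][col] == ' ' and is_valid_position(garden, row, col, flower_type, min_dist):
--             placed += 1
--             garden[row][col] = flower_type  # plant flower
--             if placed == count:
--                 return True
--     return False
-- ===== SOURCE B (Python) =====
-- def updated_positions_greedy(garden, flower_type, count, min_dist):
--     rows = len(garden)
--     cols = len(garden[0])
--     # incremental list of flower positions, checked instead of a full-grid rescan per candidate
--     positions = [(r, c) for r in range(rows) for c in range(cols)
--                  if garden[r][c] == flower_type]
--     placed = 0
--     for row in range(rows):
--         for col in range(cols):
--             if garden[row][col] == ' ' and all(
--                     abs(r - row) + abs(c - col) >= min_dist for r, c in positions):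
--                 placed += 1
--                 positions.append((row, col))
--                 garden[row][col] = flower_type  # plant flower (same mutation as A)
--                 if placed == count:
--                     return True
--     return False
-- ===== Notes on version B (the rewrite author's own statement) =====
-- stated objective: alternative
-- what changed: B builds the list of same-type flower positions once and maintains it incrementally as flowers are planted, checking each candidate cell against this list instead of A's full nested rescan of the whole grid per candidate.
-- outside the precondition, e.g. on updated_positions_greedy([], 'R', 1, 1): A raises IndexError, B raises IndexError; on updated_positions_greedy([['X', ' '], ['X']], 'R', 1, 1): A raises IndexError, B raises IndexError
import Mathlib
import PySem

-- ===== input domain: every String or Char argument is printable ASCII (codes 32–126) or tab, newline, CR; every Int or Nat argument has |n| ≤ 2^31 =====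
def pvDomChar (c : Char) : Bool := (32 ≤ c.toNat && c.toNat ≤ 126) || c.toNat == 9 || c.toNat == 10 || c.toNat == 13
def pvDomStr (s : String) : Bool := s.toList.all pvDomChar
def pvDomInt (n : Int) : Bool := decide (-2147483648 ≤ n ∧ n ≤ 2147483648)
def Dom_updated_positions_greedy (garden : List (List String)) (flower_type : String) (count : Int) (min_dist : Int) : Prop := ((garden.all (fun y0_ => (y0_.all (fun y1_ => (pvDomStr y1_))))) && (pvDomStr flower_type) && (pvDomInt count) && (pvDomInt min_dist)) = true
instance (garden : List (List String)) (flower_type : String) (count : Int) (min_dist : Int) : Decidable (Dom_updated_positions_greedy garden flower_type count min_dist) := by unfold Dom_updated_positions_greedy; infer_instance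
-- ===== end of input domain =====

-- B maintains an incremental list of flower positions and checks candidates against it,
-- instead of A's full rescan of the whole grid per candidate. Both A and B plant flowers into `garden`
-- in place (the same writes, in the same order); the equivalence proved here is about the
-- return value, with the evolving grid threaded through the ports as explicit state.

-- ===== PORT A =====

-- cell read garden[r][c] (indices in range under Pre_; getD default is irrelevant there)
def pvCell (garden : List (List String)) (r c : Nat) : String :=
  (garden.getD r []).getD c ""

-- garden[r][c] = v
def pvSetCell (garden : List (List String)) (r c : Nat) (v : String) : List (List String) :=
  garden.modify r (fun rw => rw.set c v)

-- row-major itertools.product(range R, range C)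
def pvProduct (R C : Nat) : List (Nat × Nat) :=
  (List.range R).flatMap (fun r => (List.range C).map (fun c => (r, c)))

-- def distance(x1, x2, y1, y2): return abs(x2-x1) + abs(y2-y1)
def pvDistance (x1 x2 y1 y2 : Int) : Int := |x2 - x1| + |y2 - y1|

-- is_valid_position: full nested rescan of the grid
def pvIsValid (garden : List (List String)) (row col : Nat) (ft : String) (md : Int) : Bool :=
  (List.range garden.length).all fun r =>
    (List.range (garden.getD 0 []).length).all fun c =>
      !(pvCell garden r c == ft) || decide (md ≤ pvDistance (col : Int) (c : Int) (row : Int) (r : Int))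

-- A's main loop: state = (current garden, placed)
def pvGoA (ft : String) (count md : Int) : List (List String) → Int → List (Nat × Nat) → Bool
  | _, _, [] => false
  | g, placed, (row, col) :: rest =>
    if pvCell g row col == " " && pvIsValid g row col ft md then
      let g' := pvSetCell g row col ft
      if placed + 1 == count then true
      else pvGoA ft count md g' (placed + 1) rest
    else pvGoA ft count md g placed rest

def updated_positions_greedy (garden : List (List String)) (flower_type : String) (count : Int) (min_dist : Int) : Bool :=
  pvGoA flower_type count min_dist garden 0
    (pvProduct garden.length (garden.getD 0 []).length)

-- ===== PORT B =====

-- B's main loop: state = (current garden, placed, incremental list of flower positions)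
def pvGoB (ft : String) (count md : Int) :
    List (List String) → Int → List (Nat × Nat) → List (Nat × Nat) → Bool
  | _, _, _, [] => false
  | g, placed, positions, (row, col) :: rest =>
    if pvCell g row col == " " &&
        positions.all (fun p => decide (md ≤ |(p.1 : Int) - (row : Int)| + |(p.2 : Int) - (col : Int)|)) then
      let g' := pvSetCell g row col ft
      if placed + 1 == count then true
      else pvGoB ft count md g' (placed + 1) (positions ++ [(row, col)]) rest
    else pvGoB ft count md g placed positions rest

def updated_positions_greedy_alt (garden : List (List String)) (flower_type : String) (count : Int) (min_dist : Int) : Bool :=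
  let rows := garden.length
  let cols := (garden.getD 0 []).length
  let positions := (pvProduct rows cols).filter (fun p => pvCell garden p.1 p.2 == flower_type)
  pvGoB flower_type count min_dist garden 0 positions (pvProduct rows cols)

-- ===== PRECONDITION & SPEC =====
-- Pre_ excludes exactly the inputs on which the Python A raises an IndexError:
-- an empty garden (len(garden[0])) and gardens whose some row is shorter than row 0.
def Pre_updated_positions_greedy (garden : List (List String)) (_flower_type : String) (_count : Int) (_min_dist : Int) : Prop :=
  garden ≠ [] ∧ ∀ rw ∈ garden, (garden.getD 0 []).length ≤ rw.length

instance (garden : List (List String)) (flower_type : String) (count : Int) (min_dist : Int) : Decidable (Pre_updated_positions_greedy garden flower_type count min_dist) := by unfold Pre_updated_positions_greedy; infer_instance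

def pvWitness_updated_positions_greedy : List (List String) × String × Int × Int :=
  ([[" ", "R"], [" ", " "]], "R", 2, 2)

def Spec_updated_positions_greedy (garden : List (List String)) (flower_type : String) (count : Int) (min_dist : Int) (out : Bool) : Prop := out = updated_positions_greedy_alt garden flower_type count min_dist
instance (garden : List (List String)) (flower_type : String) (count : Int) (min_dist : Int) (out : Bool) : Decidable (Spec_updated_positions_greedy garden flower_type count min_dist out) := by unfold Spec_updated_positions_greedy; infer_instance

-- ===== CLAIM (what is proved, stated in full; the proofs are below) =====
def Claim_equal_updated_positions_greedy : Prop := ∀ (garden : List (List String)) (flower_type : String) (count : Int) (min_dist : Int), Dom_updated_positions_greedy garden flower_type count min_dist → Pre_updated_positions_greedy garden flower_type count min_dist → Spec_updated_positions_greedy garden flower_type count min_dist (updated_positions_greedy garden flower_type count min_dist)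

-- ===== LEMMAS AND PROOFS =====

-- The loop invariant relating A's grid-state to B's (grid, positions)-state.
-- R/C are the (constant) scan bounds; positions holds exactly the in-bounds cells equal to ft.
def pvInv (R C : Nat) (ft : String) (g : List (List String)) (positions : List (Nat × Nat)) : Prop :=
  g.length = R ∧ (g.getD 0 []).length = C ∧
  (∀ i : Nat, i < g.length → C ≤ (g.getD i []).length) ∧
  (∀ r c : Nat, (r, c) ∈ positions ↔ (r < R ∧ c < C ∧ (pvCell g r c == ft) = true))

theorem mem_pvProduct (R C r c : Nat) : (r, c) ∈ pvProduct R C ↔ r < R ∧ c < C := by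
  simp [pvProduct]

theorem pvSetCell_length (g : List (List String)) (r c : Nat) (v : String) :
    (pvSetCell g r c v).length = g.length := by
  simp [pvSetCell]

theorem pvCell_set_ne (g : List (List String)) (row col r c : Nat) (v : String)
    (h : ¬(r = row ∧ c = col)) : pvCell (pvSetCell g row col v) r c = pvCell g r c := by
  unfold pvCell pvSetCell
  by_cases hr : r = row
  · subst hr
    have hc : c ≠ col := fun hc => h ⟨rfl, hc⟩
    simp [List.getD]
    cases g[r]? with
    | none => simp
    | some rw => simp [List.getElem?_set_ne (Ne.symm hc)]
  · simp only [List.getD]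
    rw [List.getElem?_modify_ne _ _ (fun h => hr h.symm)]

theorem pvCell_set_self (g : List (List String)) (row col : Nat) (v : String)
    (hr : row < g.length) (hc : col < (g.getD row []).length) :
    pvCell (pvSetCell g row col v) row col = v := by
  unfold pvCell pvSetCell
  have : g[row]? = some g[row] := List.getElem?_eq_getElem hr
  simp [List.getD, this] at hc ⊢
  simp [List.getElem?_set_self hc]

theorem pvSetCell_rows (g : List (List String)) (row col : Nat) (v : String) (C : Nat)
    (h : ∀ i : Nat, i < g.length → C ≤ (g.getD i []).length) :
    ∀ i : Nat, i < (pvSetCell g row col v).length → C ≤ ((pvSetCell g row col v).getD i []).length := by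
  intro i hi
  rw [pvSetCell_length] at hi
  unfold pvSetCell
  by_cases heq : row = i
  · subst heq
    have := h row hi
    simp only [List.getD, List.getElem?_modify] at *
    cases hg : g[row]? with
    | none => rw [hg] at this; simpa using this
    | some rw => rw [hg] at this; simpa using this
  · simp only [List.getD]
    rw [List.getElem?_modify_ne _ _ heq]
    exact h i hi

theorem pvSetCell_col0 (g : List (List String)) (row col : Nat) (v : String) :
    ((pvSetCell g row col v).getD 0 []).length = (g.getD 0 []).length := by
  unfold pvSetCell
  by_cases h0 : row = 0
  · subst h0
    simp [List.getD]
    cases g[0]? with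
    | none => rfl
    | some rw => simp
  · simp only [List.getD]
    rw [List.getElem?_modify_ne _ _ h0]

-- Under the invariant, A's full rescan equals B's check against the position list.
theorem pvIsValid_eq (R C : Nat) (ft : String) (md : Int) (g : List (List String))
    (positions : List (Nat × Nat)) (hInv : pvInv R C ft g positions) (row col : Nat) :
    pvIsValid g row col ft md =
      positions.all (fun p => decide (md ≤ |(p.1 : Int) - (row : Int)| + |(p.2 : Int) - (col : Int)|)) := by
  obtain ⟨hR, hC, _, hmem⟩ := hInv
  apply Bool.eq_iff_iff.mpr
  simp only [pvIsValid, List.all_eq_true, List.mem_range, hR, hC, Bool.or_eq_true,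
    Bool.not_eq_eq_eq_not, Bool.not_true, decide_eq_true_eq, pvDistance]
  constructor
  · rintro h ⟨r, c⟩ hp
    obtain ⟨hr, hc, hft⟩ := (hmem r c).mp hp
    show md ≤ |(r : Int) - (row : Int)| + |(c : Int) - (col : Int)|
    rcases h r hr c hc with h1 | h2
    · simp [hft] at h1
    · omega
  · intro h r hr c hc
    by_cases hft : (pvCell g r c == ft) = true
    · right
      have h2 : md ≤ |(r : Int) - (row : Int)| + |(c : Int) - (col : Int)| :=
        h (r, c) ((hmem r c).mpr ⟨hr, hc, hft⟩)
      omega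
    · left; simpa using hft

-- Planting preserves the invariant.
theorem pvInv_plant (R C : Nat) (ft : String) (g : List (List String))
    (positions : List (Nat × Nat)) (hInv : pvInv R C ft g positions)
    (row col : Nat) (hrow : row < R) (hcol : col < C) :
    pvInv R C ft (pvSetCell g row col ft) (positions ++ [(row, col)]) := by
  obtain ⟨hR, hC, hrows, hmem⟩ := hInv
  have hrowlen : C ≤ (g.getD row []).length := hrows row (hR ▸ hrow)
  refine ⟨by rw [pvSetCell_length]; exact hR, by rw [pvSetCell_col0]; exact hC,
    pvSetCell_rows g row col ft C hrows, ?_⟩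
  intro r c
  by_cases heq : r = row ∧ c = col
  · obtain ⟨rfl, rfl⟩ := heq
    simp [pvCell_set_self g r c ft (hR ▸ hrow) (lt_of_lt_of_le hcol hrowlen), hrow, hcol]
  · rw [pvCell_set_ne g row col r c ft heq]
    have : (r, c) ∈ positions ++ [(row, col)] ↔ (r, c) ∈ positions := by
      simp only [List.mem_append, List.mem_singleton, Prod.mk.injEq]
      constructor
      · rintro (h | ⟨rfl, rfl⟩); · exact h
        · exact absurd ⟨rfl, rfl⟩ heq
      · exact Or.inl
    rw [this]; exact hmem r c

-- Main loop correspondence.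
theorem pvGo_eq (R C : Nat) (ft : String) (count md : Int) :
    ∀ (l : List (Nat × Nat)) (g : List (List String)) (placed : Int)
      (positions : List (Nat × Nat)),
      pvInv R C ft g positions → (∀ p ∈ l, p.1 < R ∧ p.2 < C) →
      pvGoA ft count md g placed l = pvGoB ft count md g placed positions l := by
  intro l
  induction l with
  | nil => intro g placed positions _ _; rfl
  | cons hd tl ih =>
    intro g placed positions hInv hl
    obtain ⟨row, col⟩ := hd
    have hrc := hl (row, col) (by simp)
    simp only [pvGoA, pvGoB, pvIsValid_eq R C ft md g positions hInv row col]
    split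
    · split
      · rfl
      · exact ih _ _ _ (pvInv_plant R C ft g positions hInv row col hrc.1 hrc.2)
          (fun p hp => hl p (List.mem_cons_of_mem _ hp))
    · exact ih _ _ _ hInv (fun p hp => hl p (List.mem_cons_of_mem _ hp))

-- ===== VERDICT (by name: the statement is the Claim_ definition above) =====
theorem updated_positions_greedy_spec : Claim_equal_updated_positions_greedy := by
  intro garden ft count md _ hPre
  unfold Spec_updated_positions_greedy updated_positions_greedy updated_positions_greedy_alt
  apply pvGo_eq garden.length ((garden.getD 0 []).length) ft count md
  · refine ⟨rfl, rfl, ?_, ?_⟩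
    · intro i hi
      have := hPre.2 (garden.getD i []) (by
        rw [List.getD_eq_getElem _ _ hi]; exact List.getElem_mem _)
      exact this
    intro r c
    simp only [List.mem_filter, mem_pvProduct]
    tauto
  · intro p hp
    obtain ⟨r, c⟩ := p
    exact (mem_pvProduct _ _ r c).mp hp
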